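-- pv_equiv track=rewrite | github.com/paskaa/freqtrade_freqai | user_data/scripts/update_dynamic_pairs.py | get_top_pairs
-- ===== SOURCE A (Python) =====
-- def get_top_pairs(pairs, n=15):
--     """获取前N个交易对"""
--     # 优先选择主流币
--     priority_coins = ["BTC", "ETH", "SOL", "XRP", "BNB", "DOGE", "AVAX", "LINK", "MATIC", "ARB", "OP", "ATOM", "LTC", "NEAR", "FIL", "INJ", "SUI", "WIF", "AAVE", "APT"]
--
--     selected = []
--     others = []
--
--     for p in pairs:
--         symbol = p["pair"].split("/")[0]
--         if symbol in priority_coins: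
--             selected.append(p)
--         else:
--             others.append(p)
--
--     # 合并，优先主流币
--     result = selected + others
--     return result[:n]
-- ===== SOURCE B (Python) =====
-- def get_top_pairs(pairs, n=15):
--     """获取前N个交易对 — single stable sort by priority key instead of a two-bucket partition loop."""
--     priority_coins = ["BTC", "ETH", "SOL", "XRP", "BNB", "DOGE", "AVAX", "LINK", "MATIC", "ARB", "OP", "ATOM", "LTC", "NEAR", "FIL", "INJ", "SUI", "WIF", "AAVE", "APT"]
--     return sorted(pairs, key=lambda p: 0 if p["pair"].split("/")[0] in priority_coins else 1)[:n]
-- ===== Notes on version B (the rewrite author's own statement) =====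
-- stated objective: idiomatic
-- what changed: Replaces the manual two-bucket partition loop (selected/others lists merged afterwards) with a single stable sort on a 0/1 priority key followed by [:n]; stability makes the sort reproduce exactly the partition order.
import Mathlib
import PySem

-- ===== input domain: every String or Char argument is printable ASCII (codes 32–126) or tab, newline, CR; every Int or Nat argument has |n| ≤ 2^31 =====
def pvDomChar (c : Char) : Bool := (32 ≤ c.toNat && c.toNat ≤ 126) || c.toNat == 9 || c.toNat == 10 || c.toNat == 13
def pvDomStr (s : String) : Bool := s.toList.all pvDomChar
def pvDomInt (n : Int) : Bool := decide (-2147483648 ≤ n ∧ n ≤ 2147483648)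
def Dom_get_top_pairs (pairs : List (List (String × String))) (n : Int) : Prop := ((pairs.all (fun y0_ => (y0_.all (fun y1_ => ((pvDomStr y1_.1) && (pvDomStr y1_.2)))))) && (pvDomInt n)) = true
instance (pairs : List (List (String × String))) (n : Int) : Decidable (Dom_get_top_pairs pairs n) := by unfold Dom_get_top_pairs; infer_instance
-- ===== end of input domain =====

-- B replaces A's two-bucket partition loop with one stable sort on a 0/1 priority key (idiomatic; return value only).


-- ===== PORT A =====
-- helpers shared by both ports (same literal list and the same `p["pair"].split("/")[0]` in both Pythons)
def pvPriorityCoins : List String :=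
  ["BTC", "ETH", "SOL", "XRP", "BNB", "DOGE", "AVAX", "LINK", "MATIC", "ARB", "OP", "ATOM", "LTC", "NEAR", "FIL", "INJ", "SUI", "WIF", "AAVE", "APT"]

-- p["pair"].split("/")[0]; the dict lookup is first-match (getD "" only fires where Python raises KeyError,
-- excluded by Pre_); split with the nonempty separator "/" always returns a nonempty list, so [0] is its head.
def pvSymbol (p : List (String × String)) : String :=
  (((PySem.Str.split? ((p.find? (fun kv => kv.1 == "pair")).map (·.2) |>.getD "") "/").getD [])).headD ""

def get_top_pairs (pairs : List (List (String × String))) (n : Int) : List (List (String × String)) :=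
  let acc := pairs.foldl
    (fun (acc : List (List (String × String)) × List (List (String × String))) p =>
      if pvPriorityCoins.contains (pvSymbol p) then (acc.1 ++ [p], acc.2) else (acc.1, acc.2 ++ [p]))
    ([], [])
  PySem.List.slice (acc.1 ++ acc.2) none (some n)

-- ===== PORT B =====
-- the 0/1 key of B's sort (the lambda in Source B)
def pvKey (p : List (String × String)) : Int :=
  if pvPriorityCoins.contains (pvSymbol p) then 0 else 1

def get_top_pairs_alt (pairs : List (List (String × String))) (n : Int) : List (List (String × String)) :=
  PySem.List.slice (PySem.List.sorted pairs pvKey false) none (some n)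

-- ===== PRECONDITION & SPEC =====
-- Pre_ excludes exactly the inputs where a dict lacks the key "pair": Python A raises KeyError there (so does B).
def Pre_get_top_pairs (pairs : List (List (String × String))) (n : Int) : Prop :=
  ∀ p ∈ pairs, (p.find? (fun kv => kv.1 == "pair")).isSome = true
instance (pairs : List (List (String × String))) (n : Int) : Decidable (Pre_get_top_pairs pairs n) := by unfold Pre_get_top_pairs; infer_instance

def pvWitness_get_top_pairs : (List (List (String × String))) × Int :=
  ([[("pair", "BTC/USDT")], [("pair", "FOO/USDT")], [("pair", "ETH/USDT")]], 2)

def Spec_get_top_pairs (pairs : List (List (String × String))) (n : Int) (out : List (List (String × String))) : Prop := out = get_top_pairs_alt pairs n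
instance (pairs : List (List (String × String))) (n : Int) (out : List (List (String × String))) : Decidable (Spec_get_top_pairs pairs n out) := by unfold Spec_get_top_pairs; infer_instance

-- ===== CLAIM (what is proved, stated in full; the proofs are below) =====
def Claim_equal_get_top_pairs : Prop := ∀ (pairs : List (List (String × String))) (n : Int), Dom_get_top_pairs pairs n → Pre_get_top_pairs pairs n → Spec_get_top_pairs pairs n (get_top_pairs pairs n)

-- ===== LEMMAS AND PROOFS =====

theorem pvKey01 (p : List (String × String)) : pvKey p = 0 ∨ pvKey p = 1 := by
  unfold pvKey; split <;> simp

-- inserting into sel ++ oth (sel all key 0, oth all key 1) lands exactly where A's partition puts it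
theorem pvInsert01 (x : List (String × String)) (sel oth : List (List (String × String)))
    (hs : ∀ y ∈ sel, pvKey y = 0) (ho : ∀ y ∈ oth, pvKey y = 1) :
    PySem.List.insertBy (fun a b => decide (pvKey a < pvKey b)) x (sel ++ oth)
      = if pvKey x = 0 then sel ++ x :: oth else sel ++ (oth ++ [x]) := by
  by_cases hx : pvKey x = 0
  · rw [if_pos hx]
    induction sel with
    | nil =>
      simp only [List.nil_append]
      cases oth with
      | nil => simp [PySem.List.insertBy]
      | cons o os =>
        have h1 : pvKey o = 1 := ho o (by simp)
        simp [PySem.List.insertBy, hx, h1]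
    | cons s ss ih =>
      have hks : pvKey s = 0 := hs s (by simp)
      have hb : decide (pvKey x < pvKey s) = false := by simp [hx, hks]
      simp only [List.cons_append, PySem.List.insertBy, hb, Bool.false_eq_true, if_false]
      rw [ih (fun y hy => hs y (List.mem_cons_of_mem _ hy))]
  · have hx1 : pvKey x = 1 := (pvKey01 x).resolve_left hx
    rw [if_neg hx, PySem.List.insertBy_of_forall_not_before, List.append_assoc]
    intro y hy
    rcases List.mem_append.mp hy with h | h
    · simp [hx1, hs y h]
    · simp [hx1, ho y h]

-- loop invariant: B's insertion-sort fold over a partitioned accumulator equals A's two-bucket fold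
theorem pvFoldEq (xs : List (List (String × String))) (sel oth : List (List (String × String)))
    (hs : ∀ y ∈ sel, pvKey y = 0) (ho : ∀ y ∈ oth, pvKey y = 1) :
    xs.foldl (fun acc x => PySem.List.insertBy (fun a b => decide (pvKey a < pvKey b)) x acc) (sel ++ oth)
      = (xs.foldl (fun (acc : List (List (String × String)) × List (List (String × String))) p =>
          if pvPriorityCoins.contains (pvSymbol p) then (acc.1 ++ [p], acc.2) else (acc.1, acc.2 ++ [p])) (sel, oth)).1
        ++ (xs.foldl (fun (acc : List (List (String × String)) × List (List (String × String))) p =>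
          if pvPriorityCoins.contains (pvSymbol p) then (acc.1 ++ [p], acc.2) else (acc.1, acc.2 ++ [p])) (sel, oth)).2 := by
  induction xs generalizing sel oth with
  | nil => simp
  | cons x xs ih =>
    simp only [List.foldl_cons]
    rw [pvInsert01 x sel oth hs ho]
    by_cases hc : pvPriorityCoins.contains (pvSymbol x)
    · have hx0 : pvKey x = 0 := by unfold pvKey; rw [if_pos hc]
      rw [if_pos hx0, if_pos hc]
      have : sel ++ x :: oth = (sel ++ [x]) ++ oth := by simp
      rw [this, ih (sel ++ [x]) oth
        (by intro y hy; rcases List.mem_append.mp hy with h | h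
            · exact hs y h
            · simp at h; subst h; exact hx0) ho]
    · have hx1 : pvKey x = 1 := by unfold pvKey; rw [if_neg hc]
      rw [if_neg (by simp [hx1]), if_neg hc]
      rw [ih sel (oth ++ [x]) hs
        (by intro y hy; rcases List.mem_append.mp hy with h | h
            · exact ho y h
            · simp at h; subst h; exact hx1)]

-- ===== VERDICT (by name: the statement is the Claim_ definition above) =====
theorem get_top_pairs_spec : Claim_equal_get_top_pairs := by
  intro pairs n _ _
  unfold Spec_get_top_pairs get_top_pairs get_top_pairs_alt
  rw [PySem.List.sorted_eq_foldl_insertBy]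
  have := pvFoldEq pairs [] [] (by simp) (by simp)
  simp only [List.nil_append] at this
  rw [this]
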